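-- pv_equiv track=rewrite | github.com/UnbubbleHub/gdelt-pulse | src/gdelt_event_pipeline/normalization/gkg_fields.py | _parse_name_offset_field
-- ===== SOURCE A (Python) =====
-- def _parse_name_offset_field(raw: str) -> list[str]:
--     """Shared parser for semicolon-delimited name,offset fields."""
--     if not raw or not raw.strip():
--         return []
--
--     seen: set[str] = set()
--     results: list[str] = []
--     for entry in raw.split(";"):
--         entry = entry.strip()
--         if not entry:
--             continue
--         name = entry.split(",")[0].strip()
--         if name and name not in seen:
--             seen.add(name)
--             results.append(name)
--     return results
-- ===== SOURCE B (Python) =====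
-- def _parse_name_offset_field(raw: str) -> list[str]:
--     """Recursive back-to-front build: clean the head part, recurse on the tail,
--     and drop later duplicates of the head by filtering the recursive result."""
--     def go(parts: list[str]) -> list[str]:
--         if not parts:
--             return []
--         name = parts[0].strip().split(",")[0].strip()
--         rest = go(parts[1:])
--         if not name:
--             return rest
--         return [name] + [x for x in rest if x != name]
--     return go(raw.split(";"))
-- ===== Notes on version B (the rewrite author's own statement) =====
-- stated objective: alternative
-- what changed: Replaced the forward loop with a seen-set by a structural recursion over the parts that builds the result back-to-front and deduplicates by filtering occurrences of the head name out of the recursive result (no seen set, no dict, no top guard).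
import Mathlib
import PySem

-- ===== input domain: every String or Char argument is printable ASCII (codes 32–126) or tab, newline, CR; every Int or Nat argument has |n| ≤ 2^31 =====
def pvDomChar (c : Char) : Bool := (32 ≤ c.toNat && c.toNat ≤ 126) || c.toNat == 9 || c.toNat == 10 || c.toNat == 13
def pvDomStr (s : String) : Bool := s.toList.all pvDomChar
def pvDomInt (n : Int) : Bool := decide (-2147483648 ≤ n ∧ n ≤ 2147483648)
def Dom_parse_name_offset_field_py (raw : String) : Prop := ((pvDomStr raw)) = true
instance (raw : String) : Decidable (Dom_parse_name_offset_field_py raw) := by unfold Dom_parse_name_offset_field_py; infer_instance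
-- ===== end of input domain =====

-- B replaces A's forward seen-set loop by a structural recursion that builds the result
-- back-to-front, deduplicating by filtering the head name out of the recursive result;
-- the return values are proved equal on all inputs.

-- ===== PORT A =====
-- loop body of A's for-loop: state = (seen set, results list); 'name not in seen' is the ∉ test
def pvStepA (st : PySem.Set (List Char) × List (List Char)) (e : List Char) :
    PySem.Set (List Char) × List (List Char) :=
  let entry := PySem.Chars.strip e
  if entry = [] then st
  else
    let name := PySem.Chars.strip ((PySem.Chars.splitOn entry [',']).headD [])
    if name ≠ [] ∧ name ∉ st.1 then (st.1.add name, st.2 ++ [name]) else st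

def parse_name_offset_field_py (raw : String) : List String :=
  if raw = "" ∨ PySem.Str.strip raw = "" then []
  else
    (((PySem.Chars.splitOn raw.toList [';']).foldl pvStepA (PySem.Set.empty, [])).2).map String.ofList

-- ===== PORT B =====
-- parts[0].strip().split(",")[0].strip(); split(",") always yields a nonempty list, so [0] is headD
def pvClean (p : List Char) : List Char :=
  PySem.Chars.strip ((PySem.Chars.splitOn (PySem.Chars.strip p) [',']).headD [])

-- Source B's inner 'go': recurse on the tail, filter the head name out of the result
def pvGo : List (List Char) → List (List Char)
  | [] => []
  | p :: ps =>
      let name := pvClean p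
      let rest := pvGo ps
      if name = [] then rest else name :: rest.filter (fun x => x ≠ name)

def parse_name_offset_field_py_alt (raw : String) : List String :=
  (pvGo (PySem.Chars.splitOn raw.toList [';'])).map String.ofList

-- ===== PRECONDITION & SPEC =====
def Spec_parse_name_offset_field_py (raw : String) (out : List String) : Prop := out = parse_name_offset_field_py_alt raw
instance (raw : String) (out : List String) : Decidable (Spec_parse_name_offset_field_py raw out) := by unfold Spec_parse_name_offset_field_py; infer_instance

-- ===== CLAIM (what is proved, stated in full; the proofs are below) =====
def Claim_equal_parse_name_offset_field_py : Prop := ∀ (raw : String), Dom_parse_name_offset_field_py raw → Spec_parse_name_offset_field_py raw (parse_name_offset_field_py raw)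

-- ===== LEMMAS AND PROOFS =====

-- a part that strips to "" cleans to ""
theorem pvClean_of_strip_nil (p : List Char) (h : PySem.Chars.strip p = []) :
    pvClean p = [] := by
  unfold pvClean; rw [h]; rfl

-- strip cs = [] forces every character of cs to be whitespace
theorem pvAllSpace_of_strip_nil (cs : List Char) (h : PySem.Chars.strip cs = []) :
    ∀ c ∈ cs, PySem.Chars.isspace c = true := by
  intro c hc
  have h1 : List.dropWhile PySem.Chars.isspace (PySem.Chars.lstrip cs).reverse = [] := by
    have := congrArg List.reverse h
    simpa [PySem.Chars.strip, PySem.Chars.rstrip] using this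
  have h2 : ∀ c ∈ PySem.Chars.lstrip cs, PySem.Chars.isspace c = true := fun c hc =>
    List.dropWhile_eq_nil_iff.mp h1 c (List.mem_reverse.mpr hc)
  rw [← List.takeWhile_append_dropWhile (p := PySem.Chars.isspace) (l := cs)] at hc
  rcases List.mem_append.mp hc with h3 | h3
  · exact List.mem_takeWhile_imp h3
  · exact h2 c h3

-- splitOn.go with separator ";" never matching runs to the end of the input
theorem pvGo_no_semi (fuel : Nat) (l cur : List Char) (acc : List (List Char))
    (hf : l.length < fuel) (h : (';' : Char) ∉ l) :
    PySem.Chars.splitOn.go [';'] fuel l cur acc = ((cur.reverse ++ l) :: acc).reverse := by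
  induction fuel generalizing l cur acc with
  | zero => omega
  | succ n ih =>
      cases l with
      | nil => simp [PySem.Chars.splitOn.go]
      | cons c rest =>
          have hc : c ≠ ';' := by intro hc; exact h (by simp [hc])
          have hpre : List.isPrefixOf [';'] (c :: rest) = false := by
            simp [List.isPrefixOf]
            exact fun hh => absurd hh.symm hc
          simp only [PySem.Chars.splitOn.go, hpre]
          rw [ih rest (c :: cur) acc (by simpa using Nat.lt_of_succ_lt_succ hf)
            (fun hm => h (List.mem_cons_of_mem _ hm))]
          simp

-- a string without ';' splits on ";" into a single piece
theorem pvSplitOn_no_semi (cs : List Char) (h : (';' : Char) ∉ cs) :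
    PySem.Chars.splitOn cs [';'] = [cs] := by
  unfold PySem.Chars.splitOn
  rw [pvGo_no_semi (cs.length + 1) cs [] [] (by omega) h]
  simp

-- A's loop body for a part whose stripped entry is nonempty, phrased through pvClean
theorem pvStepA_char (s : PySem.Set (List Char)) (p : List Char)
    (hsp : ¬ PySem.Chars.strip p = []) :
    pvStepA (s, s) p =
      if pvClean p ≠ [] ∧ pvClean p ∉ s then (s ++ [pvClean p], s ++ [pvClean p])
      else (s, s) := by
  simp only [pvStepA, pvClean]
  rw [if_neg hsp]
  split_ifs with hcond
  · have h2 := hcond.2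
    simp only [List.headD_eq_head?_getD] at h2
    simp [PySem.Set.add, h2]
  · rfl

-- A's loop started in a state whose seen-set and results list coincide appends exactly
-- the elements of pvGo not yet seen, in order
theorem pvLoop_eq (ps : List (List Char)) :
    ∀ s : PySem.Set (List Char),
      (ps.foldl pvStepA (s, s)).2 = s ++ (pvGo ps).filter (fun x => x ∉ s) := by
  induction ps with
  | nil => intro s; simp [pvGo]
  | cons p ps ih =>
      intro s
      simp only [List.foldl_cons, pvGo]
      by_cases hsp : PySem.Chars.strip p = []
      · have hcl : pvClean p = [] := pvClean_of_strip_nil p hsp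
        have hstep : pvStepA (s, s) p = (s, s) := by simp [pvStepA, hsp]
        rw [hstep, ih s]
        simp [hcl]
      · rw [pvStepA_char s p hsp]
        by_cases hn : pvClean p = []
        · rw [if_neg (by intro hcond; exact hcond.1 hn), ih s]
          simp [hn]
        · by_cases hmem : pvClean p ∈ s
          · rw [if_neg (by intro hcond; exact hcond.2 hmem), ih s]
            simp only [if_neg hn, List.filter_cons]
            rw [if_neg (by simpa using hmem)]
            congr 1
            rw [List.filter_filter]
            apply List.filter_congr
            intro x _
            by_cases hx : x ∈ s
            · simp [hx]
            · have : x ≠ pvClean p := fun he => hx (he ▸ hmem)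
              simp [hx, this]
          · rw [if_pos ⟨hn, hmem⟩, ih (s ++ [pvClean p])]
            simp only [if_neg hn, List.filter_cons]
            rw [if_pos (by simpa using hmem)]
            rw [List.append_assoc]
            congr 1
            rw [List.singleton_append]
            congr 1
            rw [List.filter_filter]
            apply List.filter_congr
            intro x _
            by_cases hxe : x = pvClean p
            · simp [hxe]
            · by_cases hx : x ∈ s <;> simp [hx, hxe]

-- B returns [] whenever raw strips to ""
theorem pvAlt_nil_of_strip (raw : String) (h : PySem.Chars.strip raw.toList = []) :
    parse_name_offset_field_py_alt raw = [] := by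
  have hsemi : (';' : Char) ∉ raw.toList := by
    intro hm
    have := pvAllSpace_of_strip_nil raw.toList h ';' hm
    simp [PySem.Chars.isspace] at this
  unfold parse_name_offset_field_py_alt
  rw [pvSplitOn_no_semi raw.toList hsemi]
  simp [pvGo, pvClean_of_strip_nil raw.toList h]

-- ===== VERDICT (by name: the statement is the Claim_ definition above) =====
theorem parse_name_offset_field_py_spec : Claim_equal_parse_name_offset_field_py := by
  intro raw _
  unfold Spec_parse_name_offset_field_py parse_name_offset_field_py
  by_cases hg : raw = "" ∨ PySem.Str.strip raw = ""
  · rw [if_pos hg]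
    have hstrip : PySem.Chars.strip raw.toList = [] := by
      rcases hg with h0 | hs
      · subst h0; rfl
      · have := congrArg String.toList hs
        simpa [PySem.Str.toList_strip] using this
    exact (pvAlt_nil_of_strip raw hstrip).symm
  · rw [if_neg hg]
    unfold parse_name_offset_field_py_alt
    apply congrArg (List.map String.ofList)
    have h := pvLoop_eq (PySem.Chars.splitOn raw.toList [';']) PySem.Set.empty
    simpa [PySem.Set.empty] using h
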